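-- pv_equiv track=rewrite | github.com/Seralpa/Advent-of-code-2019 | day24/day24_1.py | bio_rating
-- ===== SOURCE A (Python) =====
-- def bio_rating(mapa):
--     count=0
--     value=1
--     for l in mapa:
--         for c in l:
--             count+=c*value
--             value*=2
--     return count
-- ===== SOURCE B (Python) =====
-- def bio_rating(mapa):
--     flat = [c for row in mapa for c in row]
--     acc = 0
--     for c in reversed(flat):
--         acc = 2 * acc + c
--     return acc
-- ===== Notes on version B (the rewrite author's own statement) =====
-- stated objective: alternative
-- what changed: Replaces A's nested loop threading a separate doubling weight variable with a flatten-then-reversed Horner fold: one accumulator acc = 2*acc + c over the flattened grid back-to-front, no weight variable (one fused multiply-add per cell instead of a multiply-add plus a weight doubling).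
import Mathlib
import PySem

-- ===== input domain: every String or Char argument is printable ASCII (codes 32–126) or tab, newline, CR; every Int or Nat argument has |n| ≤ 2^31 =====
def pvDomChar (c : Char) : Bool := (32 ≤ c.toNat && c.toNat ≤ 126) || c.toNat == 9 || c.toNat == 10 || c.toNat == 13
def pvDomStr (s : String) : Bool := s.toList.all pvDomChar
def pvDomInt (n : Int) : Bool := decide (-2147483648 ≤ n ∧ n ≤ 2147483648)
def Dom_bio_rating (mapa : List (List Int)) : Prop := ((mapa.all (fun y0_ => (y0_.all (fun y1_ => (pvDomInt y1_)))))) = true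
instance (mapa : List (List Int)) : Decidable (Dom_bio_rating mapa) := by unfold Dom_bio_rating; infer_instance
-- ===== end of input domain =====

-- B replaces A's doubling-accumulator nested loop by a flatten-then-reversed Horner
-- fold with a single accumulator (same values; objective: alternative).

-- ===== PORT A =====
-- literal port of A: nested loop threading state (count, value)
def bio_rating (mapa : List (List Int)) : Int :=
  (mapa.foldl
    (fun (st : Int × Int) l =>
      l.foldl (fun (st : Int × Int) c => (st.1 + c * st.2, st.2 * 2)) st)
    (0, 1)).1

-- ===== PORT B =====
-- literal port of B: flatten, then Horner fold over the reversed flat list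
def bio_rating_alt (mapa : List (List Int)) : Int :=
  (mapa.flatMap (fun row => row)).reverse.foldl (fun acc c => 2 * acc + c) 0

-- ===== PRECONDITION & SPEC =====
def Spec_bio_rating (mapa : List (List Int)) (out : Int) : Prop := out = bio_rating_alt mapa
instance (mapa : List (List Int)) (out : Int) : Decidable (Spec_bio_rating mapa out) := by unfold Spec_bio_rating; infer_instance

-- ===== CLAIM (what is proved, stated in full; the proofs are below) =====
def Claim_equal_bio_rating : Prop := ∀ (mapa : List (List Int)), Dom_bio_rating mapa → Spec_bio_rating mapa (bio_rating mapa)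

-- ===== LEMMAS AND PROOFS =====

-- weighted sum, Horner form
def pvWsum : List Int → Int
  | [] => 0
  | c :: cs => c + 2 * pvWsum cs

theorem pvFoldl_eq (xs : List Int) (s v : Int) :
    xs.foldl (fun (st : Int × Int) c => (st.1 + c * st.2, st.2 * 2)) (s, v)
      = (s + v * pvWsum xs, v * 2 ^ xs.length) := by
  induction xs generalizing s v with
  | nil => simp [pvWsum]
  | cons c cs ih =>
    simp only [List.foldl_cons, ih, pvWsum, List.length_cons]
    rw [Prod.mk.injEq]; constructor <;> ring

theorem pvHorner (xs : List Int) :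
    xs.reverse.foldl (fun acc c => 2 * acc + c) 0 = pvWsum xs := by
  rw [List.foldl_reverse]
  induction xs with
  | nil => simp [pvWsum]
  | cons c cs ih => simp [pvWsum, ih]; ring

theorem pvFlat (mapa : List (List Int)) (st : Int × Int) :
    mapa.foldl
      (fun (st : Int × Int) l =>
        l.foldl (fun (st : Int × Int) c => (st.1 + c * st.2, st.2 * 2)) st) st
      = (mapa.flatMap (fun row => row)).foldl
          (fun (st : Int × Int) c => (st.1 + c * st.2, st.2 * 2)) st := by
  induction mapa generalizing st with
  | nil => simp
  | cons l ls ih => simp [List.foldl_append, ih]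

-- ===== VERDICT (by name: the statement is the Claim_ definition above) =====
theorem bio_rating_spec : Claim_equal_bio_rating := by
  intro mapa _
  show bio_rating mapa = bio_rating_alt mapa
  rw [bio_rating, bio_rating_alt, pvFlat, pvFoldl_eq, pvHorner]
  simp
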